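-- pv_equiv track=rewrite | github.com/taniapeniche/SMILES | main_.py | upper_smiles
-- ===== SOURCE A (Python) =====
-- BR_L = ["br","Br","BR"]
--
-- CL_L = ["cl", "Cl","CL"]
--
-- def upper_smiles(s):
--     i = 0
--     l = len(s)
--     s_up = ""
--     while i < l:
--         if i < (l-1):
--             if s[i]+ s[i+1]  in BR_L or s[i]+ s[i+1] in CL_L:
--                 s_up += s[i].upper()
--                 s_up += s[i+1].lower()
--                 i +=2
--             else:
--                 s_up += s[i].upper()
--                 i +=1
--         elif i == (l-1):
--             s_up+=s[i].upper()
--             i +=1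
--     return s_up
-- ===== SOURCE B (Python) =====
-- def upper_smiles(s):
--     s = s.replace("br", "\x00").replace("Br", "\x00").replace("BR", "\x00")
--     s = s.replace("cl", "\x01").replace("Cl", "\x01").replace("CL", "\x01")
--     return s.upper().replace("\x00", "Br").replace("\x01", "Cl")
-- ===== Notes on version B (the rewrite author's own statement) =====
-- stated objective: faster
-- what changed: Replaced the manual index-and-window while-loop that builds the result character by character with whole-string rewriting passes: mask the six two-character halogen token spellings with placeholder characters via str.replace, uppercase the whole string at once, then restore the placeholders (correct because the six tokens start in {b,B,c,C} and end in {r,R,l,L}, so their occurrences can never overlap).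
import Mathlib
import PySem

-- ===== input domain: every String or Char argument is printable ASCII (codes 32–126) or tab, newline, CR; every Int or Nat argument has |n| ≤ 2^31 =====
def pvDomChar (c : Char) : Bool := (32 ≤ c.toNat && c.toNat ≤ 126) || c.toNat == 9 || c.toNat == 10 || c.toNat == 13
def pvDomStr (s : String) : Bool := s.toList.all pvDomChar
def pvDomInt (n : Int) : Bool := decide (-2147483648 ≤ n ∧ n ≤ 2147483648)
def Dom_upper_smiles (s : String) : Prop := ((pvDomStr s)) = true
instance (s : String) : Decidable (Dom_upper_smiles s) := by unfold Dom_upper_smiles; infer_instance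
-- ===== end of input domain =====

-- B replaces A's per-character index-and-window while-loop by whole-string rewriting
-- passes: mask the six halogen token spellings with placeholders via str.replace,
-- uppercase everything at once, then restore the placeholders (objective: faster,
-- measured).


-- ===== PORT A =====
-- the module constants BR_L / CL_L, at the List Char level (PySem string convention)
def BR_L : List (List Char) := [['b','r'], ['B','r'], ['B','R']]
def CL_L : List (List Char) := [['c','l'], ['C','l'], ['C','L']]

-- A's while-loop over the index i: the remaining suffix s[i:] plus the accumulator s_up.
-- s[i].upper() / s[i+1].lower() on a one-char string = PySem.Chars.upperChar / lowerChar (ASCII-exact).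
def upperSmilesLoop : List Char → List Char → List Char
  | c1 :: c2 :: rest, acc =>
      if [c1, c2] ∈ BR_L ∨ [c1, c2] ∈ CL_L then
        upperSmilesLoop rest (acc ++ [PySem.Chars.upperChar c1, PySem.Chars.lowerChar c2])
      else
        upperSmilesLoop (c2 :: rest) (acc ++ [PySem.Chars.upperChar c1])
  | [c], acc => acc ++ [PySem.Chars.upperChar c]
  | [], acc => acc

def upper_smiles (s : String) : String := String.ofList (upperSmilesLoop s.toList [])

-- ===== PORT B =====
def upper_smiles_alt (s : String) : String :=
  let t1 := PySem.Str.replace (PySem.Str.replace (PySem.Str.replace s "br" "\x00") "Br" "\x00") "BR" "\x00"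
  let t2 := PySem.Str.replace (PySem.Str.replace (PySem.Str.replace t1 "cl" "\x01") "Cl" "\x01") "CL" "\x01"
  PySem.Str.replace (PySem.Str.replace (PySem.Str.upper t2) "\x00" "Br") "\x01" "Cl"

-- ===== PRECONDITION & SPEC =====
def Spec_upper_smiles (s : String) (out : String) : Prop := out = upper_smiles_alt s
instance (s : String) (out : String) : Decidable (Spec_upper_smiles s out) := by unfold Spec_upper_smiles; infer_instance

-- ===== CLAIM (what is proved, stated in full; the proofs are below) =====
def Claim_equal_upper_smiles : Prop := ∀ (s : String), Dom_upper_smiles s → Spec_upper_smiles s (upper_smiles s)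

-- ===== LEMMAS AND PROOFS =====

-- the tokenisation both programs compute, written without an accumulator
def scanTok : List Char → List Char
  | c1 :: c2 :: rest =>
      if [c1, c2] ∈ BR_L ∨ [c1, c2] ∈ CL_L then
        PySem.Chars.upperChar c1 :: PySem.Chars.lowerChar c2 :: scanTok rest
      else
        PySem.Chars.upperChar c1 :: scanTok (c2 :: rest)
  | [c] => [c].map PySem.Chars.upperChar
  | [] => []

-- the char list after B's six masking passes
def maskTok : List Char → List Char
  | c1 :: c2 :: rest =>
      if [c1, c2] ∈ BR_L then '\x00' :: maskTok rest
      else if [c1, c2] ∈ CL_L then '\x01' :: maskTok rest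
      else c1 :: maskTok (c2 :: rest)
  | [c] => [c]
  | [] => []

lemma loop_eq_scan (l : List Char) : ∀ (acc : List Char), upperSmilesLoop l acc = acc ++ scanTok l := by
  induction l using scanTok.induct with
  | case1 c1 c2 rest h ih =>
    intro acc
    simp only [upperSmilesLoop, scanTok, if_pos h, ih]
    simp
  | case2 c1 c2 rest h ih =>
    intro acc
    simp only [upperSmilesLoop, scanTok, if_neg h, ih]
    simp
  | case3 c =>
    intro acc
    simp [upperSmilesLoop, scanTok]
  | case4 =>
    intro acc
    simp [upperSmilesLoop, scanTok]

-- accumulator and fuel normal forms of PySem.Chars.replace.go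
lemma go_acc (old new : List Char) : ∀ (fuel : Nat) (l acc : List Char),
    PySem.Chars.replace.go old new fuel l acc = acc.reverse ++ PySem.Chars.replace.go old new fuel l [] := by
  intro fuel
  induction fuel with
  | zero => intro l acc; simp [PySem.Chars.replace.go]
  | succ f ih =>
    intro l acc
    cases l with
    | nil => simp [PySem.Chars.replace.go]
    | cons c t =>
      simp only [PySem.Chars.replace.go]
      split
      · rw [ih _ (new.reverse ++ acc), ih _ (new.reverse ++ [])]
        simp
      · rw [ih _ (c :: acc), ih _ [c]]
        simp

lemma go_fuel (old new : List Char) (hold : old ≠ []) : ∀ (fuel : Nat) (l acc : List Char),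
    l.length ≤ fuel →
    PySem.Chars.replace.go old new (fuel + 1) l acc = PySem.Chars.replace.go old new fuel l acc := by
  intro fuel
  induction fuel with
  | zero =>
    intro l acc h
    have : l = [] := by cases l <;> simp_all
    subst this
    simp [PySem.Chars.replace.go]
  | succ f ih =>
    intro l acc h
    cases l with
    | nil => simp [PySem.Chars.replace.go]
    | cons c t =>
      simp only [PySem.Chars.replace.go]
      split
      · apply ih
        have : 1 ≤ old.length := by cases old <;> simp_all
        simp at h ⊢
        omega
      · apply ih
        simp at h; omega

lemma replace_nil (old new : List Char) (hold : old ≠ []) :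
    PySem.Chars.replace [] old new = [] := by
  simp [PySem.Chars.replace, PySem.Chars.replace.go, hold]

lemma replace_cons_nomatch {old : List Char} (new : List Char) {c : Char} {t : List Char}
    (hold : old ≠ []) (h : ¬ old.isPrefixOf (c :: t)) :
    PySem.Chars.replace (c :: t) old new = c :: PySem.Chars.replace t old new := by
  simp only [PySem.Chars.replace, List.isEmpty_iff, hold, if_false]
  simp only [List.length_cons, PySem.Chars.replace.go, h]
  rw [go_acc old new t.length t [c]]
  simp

lemma replace_cons_match2 (a b : Char) (t new : List Char) :
    PySem.Chars.replace (a :: b :: t) [a, b] new = new ++ PySem.Chars.replace t [a, b] new := by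
  have hpre : ([a,b] : List Char).isPrefixOf (a :: b :: t) = true := by
    simp [List.isPrefixOf]
  simp only [PySem.Chars.replace, List.isEmpty_iff,
    if_neg (by simp : ¬([a,b] : List Char) = [])]
  simp only [List.length_cons, PySem.Chars.replace.go, hpre, if_true]
  simp only [List.length, List.drop_succ_cons, List.drop_zero, Nat.zero_add]
  rw [go_fuel [a,b] new (by simp) t.length t (new.reverse ++ []) (le_refl _)]
  rw [go_acc [a,b] new t.length t (new.reverse ++ [])]
  simp

lemma replace_cons_match1 (x : Char) (t new : List Char) :
    PySem.Chars.replace (x :: t) [x] new = new ++ PySem.Chars.replace t [x] new := by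
  have hpre : ([x] : List Char).isPrefixOf (x :: t) = true := by simp [List.isPrefixOf]
  simp only [PySem.Chars.replace, List.isEmpty_iff, if_neg (by simp : ¬([x] : List Char) = [])]
  simp only [List.length_cons, PySem.Chars.replace.go, hpre, if_true]
  simp only [List.length, List.drop_succ_cons, List.drop_zero, Nat.zero_add]
  rw [go_acc [x] new t.length t (new.reverse ++ [])]
  simp

lemma prefix2_iff (a b c : Char) (u : List Char) :
    [a, b].isPrefixOf (c :: u) = true ↔ (c = a ∧ u.head? = some b) := by
  cases u <;> simp [List.isPrefixOf] <;> aesop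

lemma prefix1_iff (x c : Char) (u : List Char) :
    [x].isPrefixOf (c :: u) = true ↔ c = x := by
  simp [List.isPrefixOf]
  aesop

lemma replace2_skip_head {a c : Char} (b : Char) {t : List Char} (new : List Char) (h : c ≠ a) :
    PySem.Chars.replace (c :: t) [a, b] new = c :: PySem.Chars.replace t [a, b] new := by
  apply replace_cons_nomatch new (by simp)
  rw [prefix2_iff]
  tauto

lemma replace1_skip (x : Char) {c : Char} (t new : List Char) (h : c ≠ x) :
    PySem.Chars.replace (c :: t) [x] new = c :: PySem.Chars.replace t [x] new := by
  apply replace_cons_nomatch new (by simp)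
  rw [prefix1_iff]
  exact h

lemma replace2_head (c : Char) (t : List Char) (a b x : Char) :
    (PySem.Chars.replace (c :: t) [a, b] [x]).head? = some c ∨
    (PySem.Chars.replace (c :: t) [a, b] [x]).head? = some x := by
  by_cases h : ([a, b] : List Char).isPrefixOf (c :: t) = true
  · rw [prefix2_iff] at h
    obtain ⟨rfl, hh⟩ := h
    cases t with
    | nil => simp at hh
    | cons d u =>
      simp at hh; subst hh
      rw [replace_cons_match2]
      simp
  · rw [replace_cons_nomatch [x] (by simp) h]
    simp

-- singleton strings are untouched by a two-char pattern
lemma replace2_singleton (c a b : Char) (new : List Char) :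
    PySem.Chars.replace [c] [a, b] new = [c] := by
  rw [replace_cons_nomatch new (by simp) (by rw [prefix2_iff]; simp), replace_nil _ _ (by simp)]

-- heads reachable during B's masking passes
def HeadOK (c2 : Char) (u : List Char) : Prop :=
  u.head? = some c2 ∨ u.head? = some '\x00' ∨ u.head? = some '\x01'

lemma headOK_step {c2 : Char} {u : List Char} (hu : HeadOK c2 u) (a b x : Char)
    (hx : x = '\x00' ∨ x = '\x01') : HeadOK c2 (PySem.Chars.replace u [a, b] [x]) := by
  cases u with
  | nil => simp [HeadOK] at hu
  | cons d w =>
    have hd : d = c2 ∨ d = '\x00' ∨ d = '\x01' := by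
      simpa [HeadOK] using hu
    rcases replace2_head d w a b x with h | h <;> rcases hx with rfl | rfl <;>
      simp [HeadOK, h, hd]

lemma skip_over {c1 c2 : Char} {u : List Char} (hu : HeadOK c2 u) (a b : Char) (new : List Char)
    (hb : b ≠ '\x00' ∧ b ≠ '\x01') (hn : ¬ (c1 = a ∧ c2 = b)) :
    PySem.Chars.replace (c1 :: u) [a, b] new = c1 :: PySem.Chars.replace u [a, b] new := by
  apply replace_cons_nomatch new (by simp)
  rw [prefix2_iff]
  rintro ⟨rfl, hh⟩
  rcases hu with h | h | h
  · rw [h] at hh; injection hh with hh; exact hn ⟨rfl, hh⟩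
  · rw [h] at hh; injection hh with hh; exact hb.1 hh.symm
  · rw [h] at hh; injection hh with hh; exact hb.2 hh.symm

lemma replace2_skip_snd' (a b d : Char) (w new : List Char) (h : d ≠ b) :
    PySem.Chars.replace (a :: d :: w) [a, b] new = a :: PySem.Chars.replace (d :: w) [a, b] new := by
  apply replace_cons_nomatch new (by simp)
  rw [prefix2_iff]
  rintro ⟨-, hh⟩
  simp at hh
  exact h hh

def pass6 (l : List Char) : List Char :=
  PySem.Chars.replace (PySem.Chars.replace (PySem.Chars.replace
    (PySem.Chars.replace (PySem.Chars.replace (PySem.Chars.replace l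
      ['b','r'] ['\x00']) ['B','r'] ['\x00']) ['B','R'] ['\x00'])
      ['c','l'] ['\x01']) ['C','l'] ['\x01']) ['C','L'] ['\x01']

lemma pass6_eq_mask : ∀ (l : List Char), pass6 l = maskTok l := by
  intro l
  induction l using maskTok.induct with
  | case1 c1 c2 rest h ih =>
    have h3 : [c1, c2] = ['b','r'] ∨ [c1, c2] = ['B','r'] ∨ [c1, c2] = ['B','R'] := by
      simpa [BR_L] using h
    simp only [maskTok, if_pos h]
    rcases h3 with h3 | h3 | h3 <;>
      obtain ⟨rfl, rfl⟩ : _ ∧ _ := by simpa using h3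
    · -- "br"
      unfold pass6 at ih ⊢
      rw [replace_cons_match2 'b' 'r' rest ['\x00']]
      simp only [List.singleton_append]
      rw [replace2_skip_head 'r' ['\x00'] (show '\x00' ≠ 'B' by decide),
          replace2_skip_head 'R' ['\x00'] (show '\x00' ≠ 'B' by decide),
          replace2_skip_head 'l' ['\x01'] (show '\x00' ≠ 'c' by decide),
          replace2_skip_head 'l' ['\x01'] (show '\x00' ≠ 'C' by decide),
          replace2_skip_head 'L' ['\x01'] (show '\x00' ≠ 'C' by decide)]
      rw [ih]
    · -- "Br"
      unfold pass6 at ih ⊢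
      rw [replace2_skip_head 'r' ['\x00'] (show 'B' ≠ 'b' by decide),
          replace2_skip_head 'r' ['\x00'] (show 'r' ≠ 'b' by decide)]
      rw [replace_cons_match2 'B' 'r' (PySem.Chars.replace rest ['b','r'] ['\x00']) ['\x00']]
      simp only [List.singleton_append]
      rw [replace2_skip_head 'R' ['\x00'] (show '\x00' ≠ 'B' by decide),
          replace2_skip_head 'l' ['\x01'] (show '\x00' ≠ 'c' by decide),
          replace2_skip_head 'l' ['\x01'] (show '\x00' ≠ 'C' by decide),
          replace2_skip_head 'L' ['\x01'] (show '\x00' ≠ 'C' by decide)]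
      rw [ih]
    · -- "BR"
      unfold pass6 at ih ⊢
      rw [replace2_skip_head 'r' ['\x00'] (show 'B' ≠ 'b' by decide),
          replace2_skip_head 'r' ['\x00'] (show 'R' ≠ 'b' by decide)]
      rw [replace2_skip_snd' 'B' 'r' 'R' (PySem.Chars.replace rest ['b','r'] ['\x00']) ['\x00']
            (by decide),
          replace2_skip_head 'r' ['\x00'] (show 'R' ≠ 'B' by decide)]
      rw [replace_cons_match2 'B' 'R'
            (PySem.Chars.replace (PySem.Chars.replace rest ['b','r'] ['\x00']) ['B','r'] ['\x00'])
            ['\x00']]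
      simp only [List.singleton_append]
      rw [replace2_skip_head 'l' ['\x01'] (show '\x00' ≠ 'c' by decide),
          replace2_skip_head 'l' ['\x01'] (show '\x00' ≠ 'C' by decide),
          replace2_skip_head 'L' ['\x01'] (show '\x00' ≠ 'C' by decide)]
      rw [ih]
  | case2 c1 c2 rest h h' ih =>
    have h3 : [c1, c2] = ['c','l'] ∨ [c1, c2] = ['C','l'] ∨ [c1, c2] = ['C','L'] := by
      simpa [CL_L] using h'
    simp only [maskTok, if_neg h, if_pos h']
    rcases h3 with h3 | h3 | h3 <;>
      obtain ⟨rfl, rfl⟩ : _ ∧ _ := by simpa using h3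
    · -- "cl"
      unfold pass6 at ih ⊢
      rw [replace2_skip_head 'r' ['\x00'] (show 'c' ≠ 'b' by decide),
          replace2_skip_head 'r' ['\x00'] (show 'l' ≠ 'b' by decide),
          replace2_skip_head 'r' ['\x00'] (show 'c' ≠ 'B' by decide),
          replace2_skip_head 'r' ['\x00'] (show 'l' ≠ 'B' by decide),
          replace2_skip_head 'R' ['\x00'] (show 'c' ≠ 'B' by decide),
          replace2_skip_head 'R' ['\x00'] (show 'l' ≠ 'B' by decide)]
      rw [replace_cons_match2 'c' 'l'
            (PySem.Chars.replace (PySem.Chars.replace (PySem.Chars.replace rest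
              ['b','r'] ['\x00']) ['B','r'] ['\x00']) ['B','R'] ['\x00']) ['\x01']]
      simp only [List.singleton_append]
      rw [replace2_skip_head 'l' ['\x01'] (show '\x01' ≠ 'C' by decide),
          replace2_skip_head 'L' ['\x01'] (show '\x01' ≠ 'C' by decide)]
      rw [ih]
    · -- "Cl"
      unfold pass6 at ih ⊢
      rw [replace2_skip_head 'r' ['\x00'] (show 'C' ≠ 'b' by decide),
          replace2_skip_head 'r' ['\x00'] (show 'l' ≠ 'b' by decide),
          replace2_skip_head 'r' ['\x00'] (show 'C' ≠ 'B' by decide),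
          replace2_skip_head 'r' ['\x00'] (show 'l' ≠ 'B' by decide),
          replace2_skip_head 'R' ['\x00'] (show 'C' ≠ 'B' by decide),
          replace2_skip_head 'R' ['\x00'] (show 'l' ≠ 'B' by decide)]
      rw [replace2_skip_head 'l' ['\x01'] (show 'C' ≠ 'c' by decide),
          replace2_skip_head 'l' ['\x01'] (show 'l' ≠ 'c' by decide)]
      rw [replace_cons_match2 'C' 'l'
            (PySem.Chars.replace (PySem.Chars.replace (PySem.Chars.replace (PySem.Chars.replace rest
              ['b','r'] ['\x00']) ['B','r'] ['\x00']) ['B','R'] ['\x00']) ['c','l'] ['\x01'])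
            ['\x01']]
      simp only [List.singleton_append]
      rw [replace2_skip_head 'L' ['\x01'] (show '\x01' ≠ 'C' by decide)]
      rw [ih]
    · -- "CL"
      unfold pass6 at ih ⊢
      rw [replace2_skip_head 'r' ['\x00'] (show 'C' ≠ 'b' by decide),
          replace2_skip_head 'r' ['\x00'] (show 'L' ≠ 'b' by decide),
          replace2_skip_head 'r' ['\x00'] (show 'C' ≠ 'B' by decide),
          replace2_skip_head 'r' ['\x00'] (show 'L' ≠ 'B' by decide),
          replace2_skip_head 'R' ['\x00'] (show 'C' ≠ 'B' by decide),
          replace2_skip_head 'R' ['\x00'] (show 'L' ≠ 'B' by decide)]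
      rw [replace2_skip_head 'l' ['\x01'] (show 'C' ≠ 'c' by decide),
          replace2_skip_head 'l' ['\x01'] (show 'L' ≠ 'c' by decide)]
      rw [replace2_skip_snd' 'C' 'l' 'L'
            (PySem.Chars.replace (PySem.Chars.replace (PySem.Chars.replace (PySem.Chars.replace rest
              ['b','r'] ['\x00']) ['B','r'] ['\x00']) ['B','R'] ['\x00']) ['c','l'] ['\x01'])
            ['\x01'] (by decide),
          replace2_skip_head 'l' ['\x01'] (show 'L' ≠ 'C' by decide)]
      rw [replace_cons_match2 'C' 'L'
            (PySem.Chars.replace (PySem.Chars.replace (PySem.Chars.replace (PySem.Chars.replace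
              (PySem.Chars.replace rest ['b','r'] ['\x00']) ['B','r'] ['\x00']) ['B','R'] ['\x00'])
              ['c','l'] ['\x01']) ['C','l'] ['\x01']) ['\x01']]
      simp only [List.singleton_append]
      rw [ih]
  | case3 c1 c2 rest h h' ih =>
    have hBR : ¬ ([c1, c2] = ['b','r'] ∨ [c1, c2] = ['B','r'] ∨ [c1, c2] = ['B','R']) := by
      simpa [BR_L] using h
    have hCL : ¬ ([c1, c2] = ['c','l'] ∨ [c1, c2] = ['C','l'] ∨ [c1, c2] = ['C','L']) := by
      simpa [CL_L] using h'
    push Not at hBR hCL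
    have hn1 : ¬ (c1 = 'b' ∧ c2 = 'r') := by rintro ⟨ha, hb⟩; exact hBR.1 (by simp [ha, hb])
    have hn2 : ¬ (c1 = 'B' ∧ c2 = 'r') := by rintro ⟨ha, hb⟩; exact hBR.2.1 (by simp [ha, hb])
    have hn3 : ¬ (c1 = 'B' ∧ c2 = 'R') := by rintro ⟨ha, hb⟩; exact hBR.2.2 (by simp [ha, hb])
    have hn4 : ¬ (c1 = 'c' ∧ c2 = 'l') := by rintro ⟨ha, hb⟩; exact hCL.1 (by simp [ha, hb])
    have hn5 : ¬ (c1 = 'C' ∧ c2 = 'l') := by rintro ⟨ha, hb⟩; exact hCL.2.1 (by simp [ha, hb])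
    have hn6 : ¬ (c1 = 'C' ∧ c2 = 'L') := by rintro ⟨ha, hb⟩; exact hCL.2.2 (by simp [ha, hb])
    have h0 : HeadOK c2 (c2 :: rest) := by simp [HeadOK]
    have h1 := headOK_step h0 'b' 'r' '\x00' (Or.inl rfl)
    have h2 := headOK_step h1 'B' 'r' '\x00' (Or.inl rfl)
    have hh3 := headOK_step h2 'B' 'R' '\x00' (Or.inl rfl)
    have h4 := headOK_step hh3 'c' 'l' '\x01' (Or.inr rfl)
    have h5 := headOK_step h4 'C' 'l' '\x01' (Or.inr rfl)
    simp only [maskTok, if_neg h, if_neg h']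
    unfold pass6 at ih ⊢
    rw [skip_over h0 'b' 'r' ['\x00'] (by decide) hn1,
        skip_over h1 'B' 'r' ['\x00'] (by decide) hn2,
        skip_over h2 'B' 'R' ['\x00'] (by decide) hn3,
        skip_over hh3 'c' 'l' ['\x01'] (by decide) hn4,
        skip_over h4 'C' 'l' ['\x01'] (by decide) hn5,
        skip_over h5 'C' 'L' ['\x01'] (by decide) hn6]
    rw [ih]
  | case4 c =>
    unfold pass6
    simp only [maskTok]
    rw [replace2_singleton, replace2_singleton, replace2_singleton,
        replace2_singleton, replace2_singleton, replace2_singleton]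
  | case5 =>
    unfold pass6
    simp only [maskTok]
    rw [replace_nil _ _ (by simp), replace_nil _ _ (by simp), replace_nil _ _ (by simp),
        replace_nil _ _ (by simp), replace_nil _ _ (by simp), replace_nil _ _ (by simp)]


-- B's final phase: uppercase, then restore the two placeholders
def restore (u : List Char) : List Char :=
  PySem.Chars.replace (PySem.Chars.replace (PySem.Chars.upper u) ['\x00'] ['B','r']) ['\x01'] ['C','l']

lemma upperChar_ne_placeholder {c : Char} (h : pvDomChar c = true) :
    PySem.Chars.upperChar c ≠ '\x00' ∧ PySem.Chars.upperChar c ≠ '\x01' := by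
  unfold PySem.Chars.upperChar
  split
  next hl =>
    have hb : 97 ≤ c.toNat ∧ c.toNat ≤ 122 := by
      simp only [PySem.Chars.islower, Bool.and_eq_true, decide_eq_true_eq, Char.le_def] at hl
      exact ⟨hl.1, hl.2⟩
    have hv : (c.toNat - 32).isValidChar := by
      constructor
      omega
    constructor <;> intro he <;>
      have h2 := congrArg Char.toNat he <;>
      rw [Char.toNat_ofNat, if_pos hv] at h2
    · rw [show ('\x00').toNat = 0 from rfl] at h2; omega
    · rw [show ('\x01').toNat = 1 from rfl] at h2; omega
  next =>
    constructor <;> rintro rfl <;> exact absurd h (by decide)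

lemma restore_mask_eq_scan : ∀ (l : List Char), (∀ c ∈ l, pvDomChar c = true) →
    restore (maskTok l) = scanTok l := by
  intro l
  induction l using maskTok.induct with
  | case1 c1 c2 rest h ih =>
    intro hdom
    have ihr := ih (fun c hc => hdom c (by simp [hc]))
    simp only [maskTok, if_pos h, scanTok, if_pos (Or.inl h)]
    unfold restore at ihr ⊢
    simp only [PySem.Chars.upper, List.map_cons] at ihr ⊢
    rw [show PySem.Chars.upperChar '\x00' = '\x00' from by decide]
    rw [replace_cons_match1 '\x00' (List.map PySem.Chars.upperChar (maskTok rest)) ['B','r']]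
    simp only [List.cons_append, List.nil_append]
    rw [replace1_skip '\x01' _ _ (show ('B' : Char) ≠ '\x01' by decide),
        replace1_skip '\x01' _ _ (show ('r' : Char) ≠ '\x01' by decide)]
    rw [ihr]
    have h3 : [c1, c2] = ['b','r'] ∨ [c1, c2] = ['B','r'] ∨ [c1, c2] = ['B','R'] := by
      simpa [BR_L] using h
    rcases h3 with h3 | h3 | h3 <;> obtain ⟨rfl, rfl⟩ : _ ∧ _ := by simpa using h3
    · rw [show PySem.Chars.upperChar 'b' = 'B' from by decide,
          show PySem.Chars.lowerChar 'r' = 'r' from by decide]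
    · rw [show PySem.Chars.upperChar 'B' = 'B' from by decide,
          show PySem.Chars.lowerChar 'r' = 'r' from by decide]
    · rw [show PySem.Chars.upperChar 'B' = 'B' from by decide,
          show PySem.Chars.lowerChar 'R' = 'r' from by decide]
  | case2 c1 c2 rest h h' ih =>
    intro hdom
    have ihr := ih (fun c hc => hdom c (by simp [hc]))
    simp only [maskTok, if_neg h, if_pos h', scanTok, if_pos (Or.inr h')]
    unfold restore at ihr ⊢
    simp only [PySem.Chars.upper, List.map_cons] at ihr ⊢
    rw [show PySem.Chars.upperChar '\x01' = '\x01' from by decide]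
    rw [replace1_skip '\x00' _ _ (show ('\x01' : Char) ≠ '\x00' by decide)]
    rw [replace_cons_match1 '\x01'
          (PySem.Chars.replace (List.map PySem.Chars.upperChar (maskTok rest)) ['\x00'] ['B','r'])
          ['C','l']]
    simp only [List.cons_append, List.nil_append]
    rw [ihr]
    have h3 : [c1, c2] = ['c','l'] ∨ [c1, c2] = ['C','l'] ∨ [c1, c2] = ['C','L'] := by
      simpa [CL_L] using h'
    rcases h3 with h3 | h3 | h3 <;> obtain ⟨rfl, rfl⟩ : _ ∧ _ := by simpa using h3
    · rw [show PySem.Chars.upperChar 'c' = 'C' from by decide,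
          show PySem.Chars.lowerChar 'l' = 'l' from by decide]
    · rw [show PySem.Chars.upperChar 'C' = 'C' from by decide,
          show PySem.Chars.lowerChar 'l' = 'l' from by decide]
    · rw [show PySem.Chars.upperChar 'C' = 'C' from by decide,
          show PySem.Chars.lowerChar 'L' = 'l' from by decide]
  | case3 c1 c2 rest h h' ih =>
    intro hdom
    have ihr := ih (fun c hc => hdom c (by simp [hc] : c ∈ c1 :: c2 :: rest))
    have hne := upperChar_ne_placeholder (hdom c1 (by simp))
    simp only [maskTok, if_neg h, if_neg h', scanTok,
      if_neg (show ¬ ([c1, c2] ∈ BR_L ∨ [c1, c2] ∈ CL_L) by tauto)]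
    unfold restore at ihr ⊢
    simp only [PySem.Chars.upper, List.map_cons] at ihr ⊢
    rw [replace1_skip '\x00' _ _ hne.1, replace1_skip '\x01' _ _ hne.2]
    rw [ihr]
  | case4 c =>
    intro hdom
    have hne := upperChar_ne_placeholder (hdom c (by simp))
    simp only [maskTok, scanTok, List.map_cons, List.map_nil]
    unfold restore
    simp only [PySem.Chars.upper, List.map_cons, List.map_nil]
    rw [replace1_skip '\x00' _ _ hne.1, replace_nil _ _ (by simp),
        replace1_skip '\x01' _ _ hne.2, replace_nil _ _ (by simp)]
  | case5 =>
    intro _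
    simp only [maskTok, scanTok]
    unfold restore
    simp only [PySem.Chars.upper, List.map_nil]
    rw [replace_nil _ _ (by simp), replace_nil _ _ (by simp)]

-- ===== VERDICT (by name: the statement is the Claim_ definition above) =====
theorem upper_smiles_spec : Claim_equal_upper_smiles := by
  intro s hdom
  unfold Spec_upper_smiles
  have hl : ∀ c ∈ s.toList, pvDomChar c = true := by
    simpa [Dom_upper_smiles, pvDomStr, List.all_eq_true] using hdom
  calc upper_smiles s = String.ofList (scanTok s.toList) := by
        unfold upper_smiles
        rw [loop_eq_scan]
        simp
    _ = String.ofList (restore (maskTok s.toList)) := by rw [restore_mask_eq_scan _ hl]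
    _ = String.ofList (restore (pass6 s.toList)) := by rw [pass6_eq_mask]
    _ = upper_smiles_alt s := by
        simp only [upper_smiles_alt, restore, pass6, PySem.Str.replace, PySem.Str.upper,
          String.toList_ofList]
        rw [show String.toList "br" = ['b','r'] from by decide,
            show String.toList "Br" = ['B','r'] from by decide,
            show String.toList "BR" = ['B','R'] from by decide,
            show String.toList "cl" = ['c','l'] from by decide,
            show String.toList "Cl" = ['C','l'] from by decide,
            show String.toList "CL" = ['C','L'] from by decide,
            show String.toList "\x00" = ['\x00'] from by decide,
            show String.toList "\x01" = ['\x01'] from by decide]
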